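-- pv_equiv track=rewrite | github.com/yb173/atcoder-playground | abc/abc062/c/abc062_c.py | sol_D
-- ===== SOURCE A (Python) =====
-- INF = 1 << 60
--
-- def sol_D(H: int, W: int) -> int:
--     """
--     W を半分に切り，左右のどちらかを横に切る
--     """
--     ans = INF
--     for w in range(1, W):
--         ow = W - w
--         h = H // 2
--         oh = H - h
--         ma = max(ow * H, w * oh)
--         mi = min(ow * H, w * h)
--         diff = ma - mi
--         ans = min(ans, diff)
--     return ans
-- ===== SOURCE B (Python) =====
-- INF = 1 << 60
--
-- def sol_D(H: int, W: int) -> int: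
--     # diff(w) is a convex (piecewise-linear) function of w, so instead of
--     # scanning all W-1 cut positions we binary-search the valley: find the
--     # first w where diff stops decreasing.  O(log W) instead of O(W).
--     if W < 2:
--         return INF
--     h = H // 2
--     oh = H - h
--
--     def diff(w):
--         ow = W - w
--         return max(ow * H, w * oh) - min(ow * H, w * h)
--
--     lo, hi = 1, W - 1
--     while lo < hi:
--         mid = (lo + hi) // 2
--         if diff(mid + 1) >= diff(mid):
--             hi = mid
--         else:
--             lo = mid + 1
--     return min(diff(lo), INF)
-- ===== Notes on version B (the rewrite author's own statement) =====
-- stated objective: faster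
-- what changed: Instead of scanning every vertical cut width w in 1..W-1, B binary-searches the valley of the per-cut difference, which is a convex piecewise-linear function of w (max of linears minus min of linears), evaluating it O(log W) times.
import Mathlib
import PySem

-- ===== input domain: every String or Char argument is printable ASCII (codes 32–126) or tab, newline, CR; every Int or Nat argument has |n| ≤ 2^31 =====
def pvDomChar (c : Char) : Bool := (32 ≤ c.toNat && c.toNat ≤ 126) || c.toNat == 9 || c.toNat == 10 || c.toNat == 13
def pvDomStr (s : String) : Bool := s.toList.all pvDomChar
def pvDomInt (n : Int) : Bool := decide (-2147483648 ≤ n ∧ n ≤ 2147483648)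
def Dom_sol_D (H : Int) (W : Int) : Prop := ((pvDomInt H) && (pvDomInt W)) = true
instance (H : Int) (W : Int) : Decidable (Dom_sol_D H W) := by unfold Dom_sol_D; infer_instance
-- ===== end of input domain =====

-- B replaces A's linear scan over all W-1 cut widths by a binary search for the
-- valley of the convex per-cut difference function: O(log W) instead of O(W).

def pvINF : Int := 1152921504606846976  -- INF = 1 << 60

-- ===== PORT A =====
def sol_D (H : Int) (W : Int) : Int :=
  (PySem.List.pyRange 1 W).foldl
    (fun ans w =>
      let ow := W - w
      let h := PySem.Int.floordiv H 2
      let oh := H - h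
      let ma := max (ow * H) (w * oh)
      let mi := min (ow * H) (w * h)
      let diff := ma - mi
      min ans diff)
    pvINF

-- ===== PORT B =====
-- the closure `diff` of Source B (h, oh computed once outside)
def pvDiffB (H : Int) (W : Int) (h : Int) (oh : Int) (w : Int) : Int :=
  let ow := W - w
  max (ow * H) (w * oh) - min (ow * H) (w * h)

-- the `while lo < hi` binary-search loop of Source B
def pvSearch (H : Int) (W : Int) (h : Int) (oh : Int) (lo : Int) (hi : Int) : Int :=
  if hlt : lo < hi then
    let mid := PySem.Int.floordiv (lo + hi) 2
    if pvDiffB H W h oh (mid + 1) ≥ pvDiffB H W h oh mid then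
      pvSearch H W h oh lo mid
    else
      pvSearch H W h oh (mid + 1) hi
  else lo
termination_by (hi - lo).toNat
decreasing_by
  · have hb := PySem.Int.floordiv_two_mid_bounds (le_of_lt hlt)
    have hs : PySem.Int.floordiv (lo + hi) 2 < hi :=
      (PySem.Int.floordiv_lt_iff_lt_mul (by norm_num)).mpr (by omega)
    omega
  · have hb := PySem.Int.floordiv_two_mid_bounds (le_of_lt hlt)
    have hs : PySem.Int.floordiv (lo + hi) 2 < hi :=
      (PySem.Int.floordiv_lt_iff_lt_mul (by norm_num)).mpr (by omega)
    omega

def sol_D_alt (H : Int) (W : Int) : Int :=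
  if W < 2 then pvINF
  else
    let h := PySem.Int.floordiv H 2
    let oh := H - h
    let lo := pvSearch H W h oh 1 (W - 1)
    min (pvDiffB H W h oh lo) pvINF

-- ===== PRECONDITION & SPEC =====
def Spec_sol_D (H : Int) (W : Int) (out : Int) : Prop := out = sol_D_alt H W
instance (H : Int) (W : Int) (out : Int) : Decidable (Spec_sol_D H W out) := by unfold Spec_sol_D; infer_instance

-- ===== CLAIM (what is proved, stated in full; the proofs are below) =====
def Claim_equal_sol_D : Prop := ∀ (H : Int) (W : Int), Dom_sol_D H W → Spec_sol_D H W (sol_D H W)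

-- ===== LEMMAS AND PROOFS =====

-- diff is discretely convex in w (max of linears minus min of linears)
theorem pvDiffB_convex (H W h oh w : Int) :
    2 * pvDiffB H W h oh w ≤ pvDiffB H W h oh (w - 1) + pvDiffB H W h oh (w + 1) := by
  simp only [pvDiffB]
  have eA : (W - (w - 1)) * H + (W - (w + 1)) * H = 2 * ((W - w) * H) := by ring
  have eB : (w - 1) * oh + (w + 1) * oh = 2 * (w * oh) := by ring
  have eC : (w - 1) * h + (w + 1) * h = 2 * (w * h) := by ring
  have hmax : 2 * max ((W - w) * H) (w * oh)
      ≤ max ((W - (w - 1)) * H) ((w - 1) * oh) + max ((W - (w + 1)) * H) ((w + 1) * oh) := by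
    have a0 := le_max_left ((W - (w - 1)) * H) ((w - 1) * oh)
    have b0 := le_max_right ((W - (w - 1)) * H) ((w - 1) * oh)
    have a2 := le_max_left ((W - (w + 1)) * H) ((w + 1) * oh)
    have b2 := le_max_right ((W - (w + 1)) * H) ((w + 1) * oh)
    rcases max_cases ((W - w) * H) (w * oh) with ⟨he, _⟩ | ⟨he, _⟩ <;> rw [he] <;> linarith
  have hmin : min ((W - (w - 1)) * H) ((w - 1) * h) + min ((W - (w + 1)) * H) ((w + 1) * h)
      ≤ 2 * min ((W - w) * H) (w * h) := by
    have a0 := min_le_left ((W - (w - 1)) * H) ((w - 1) * h)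
    have c0 := min_le_right ((W - (w - 1)) * H) ((w - 1) * h)
    have a2 := min_le_left ((W - (w + 1)) * H) ((w + 1) * h)
    have c2 := min_le_right ((W - (w + 1)) * H) ((w + 1) * h)
    rcases min_cases ((W - w) * H) (w * h) with ⟨he, _⟩ | ⟨he, _⟩ <;> rw [he] <;> linarith
  linarith

-- the forward difference Δ(w) = diff(w+1) - diff(w) is monotone nondecreasing
theorem pvDiffB_delta_mono (H W h oh : Int) (u v : Int) (huv : u ≤ v) :
    pvDiffB H W h oh (u + 1) - pvDiffB H W h oh u
      ≤ pvDiffB H W h oh (v + 1) - pvDiffB H W h oh v := by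
  have key : ∀ n : Nat, pvDiffB H W h oh (u + 1) - pvDiffB H W h oh u
      ≤ pvDiffB H W h oh ((u + n) + 1) - pvDiffB H W h oh (u + n) := by
    intro n
    induction n with
    | zero => simp
    | succ k ih =>
      have hc := pvDiffB_convex H W h oh (u + k + 1)
      have e1 : (u + k + 1 : Int) - 1 = u + k := by ring
      have e2 : ((u : Int) + (k + 1 : Nat)) = u + k + 1 := by push_cast; ring
      rw [e1] at hc
      rw [e2]
      linarith
  have := key (v - u).toNat
  have e : (u : Int) + ((v - u).toNat : Int) = v := by omega
  rwa [e] at this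

-- if Δ(c) ≥ 0 then diff is nondecreasing to the right of c
theorem pvDiffB_inc (H W h oh c : Int)
    (hc : pvDiffB H W h oh c ≤ pvDiffB H W h oh (c + 1)) :
    ∀ w, c ≤ w → pvDiffB H W h oh c ≤ pvDiffB H W h oh w := by
  have key : ∀ n : Nat, pvDiffB H W h oh c ≤ pvDiffB H W h oh (c + n) := by
    intro n
    induction n with
    | zero => simp
    | succ k ih =>
      have hm := pvDiffB_delta_mono H W h oh c (c + k) (by omega)
      have e : ((c : Int) + (k + 1 : Nat)) = (c + k) + 1 := by push_cast; ring
      rw [e]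
      linarith
  intro w hw
  have := key (w - c).toNat
  have e : (c : Int) + ((w - c).toNat : Int) = w := by omega
  rwa [e] at this

-- if Δ(c) < 0 then diff(c+1) is below every value at or left of c
theorem pvDiffB_dec (H W h oh c : Int)
    (hc : pvDiffB H W h oh (c + 1) < pvDiffB H W h oh c) :
    ∀ w, w ≤ c → pvDiffB H W h oh (c + 1) ≤ pvDiffB H W h oh w := by
  have key : ∀ n : Nat, pvDiffB H W h oh (c + 1) ≤ pvDiffB H W h oh (c - n) := by
    intro n
    induction n with
    | zero => simp; linarith
    | succ k ih =>
      have hm := pvDiffB_delta_mono H W h oh (c - (k + 1)) c (by omega)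
      have e : (c : Int) - (k + 1 : Nat) = (c - ((k : Nat) : Int)) - 1 := by push_cast; ring
      have e2 : ((c : Int) - (k + 1 : Nat)) + 1 = c - ((k : Nat) : Int) := by push_cast; ring
      rw [e]
      have := pvDiffB_delta_mono H W h oh (c - ((k : Nat) : Int) - 1) c (by omega)
      have e3 : (c - ((k : Nat) : Int) - 1) + 1 = c - ((k : Nat) : Int) := by ring
      rw [e3] at this
      linarith
  intro w hw
  have := key (c - w).toNat
  have e : (c : Int) - ((c - w).toNat : Int) = w := by omega
  rwa [e] at this

-- binary-search invariants: the result r stays in [lo, hi], carries "r = a or Δ(r-1) < 0"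
-- and "r = b or Δ(r) ≥ 0" provided the call does
theorem pvSearch_spec (H W h oh a b : Int) :
    ∀ n : Nat, ∀ lo hi : Int, (hi - lo).toNat = n → lo ≤ hi →
    (lo = a ∨ pvDiffB H W h oh lo < pvDiffB H W h oh (lo - 1)) →
    (hi = b ∨ pvDiffB H W h oh hi ≤ pvDiffB H W h oh (hi + 1)) →
    lo ≤ pvSearch H W h oh lo hi ∧ pvSearch H W h oh lo hi ≤ hi ∧
    (pvSearch H W h oh lo hi = a ∨
      pvDiffB H W h oh (pvSearch H W h oh lo hi) < pvDiffB H W h oh (pvSearch H W h oh lo hi - 1)) ∧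
    (pvSearch H W h oh lo hi = b ∨
      pvDiffB H W h oh (pvSearch H W h oh lo hi) ≤ pvDiffB H W h oh (pvSearch H W h oh lo hi + 1)) := by
  intro n
  induction n using Nat.strong_induction_on with
  | _ n ih =>
    intro lo hi hn hle hlo hhi
    rw [pvSearch]
    by_cases hlt : lo < hi
    · simp only [dif_pos hlt]
      have hb := PySem.Int.floordiv_two_mid_bounds (le_of_lt hlt)
      have hs : PySem.Int.floordiv (lo + hi) 2 < hi :=
        (PySem.Int.floordiv_lt_iff_lt_mul (by norm_num)).mpr (by omega)
      set mid := PySem.Int.floordiv (lo + hi) 2 with hmid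
      by_cases hP : pvDiffB H W h oh (mid + 1) ≥ pvDiffB H W h oh mid
      · simp only [if_pos hP]
        exact (ih (mid - lo).toNat (by omega) lo mid rfl (by omega) hlo (Or.inr hP)).imp
          id (fun ⟨h1, h2, h3⟩ => ⟨by omega, h2, h3⟩)
      · simp only [if_neg hP]
        push Not at hP
        have := ih (hi - (mid + 1)).toNat (by omega) (mid + 1) hi rfl (by omega)
          (Or.inr (by simpa using hP)) hhi
        exact ⟨by omega, this.2⟩
    · simp only [dif_neg hlt]
      have : lo = hi := by omega
      exact ⟨le_refl _, by omega, hlo, by rw [this]; exact hhi⟩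

-- the value found by the search is a global minimum of diff on [1, W-1]
theorem pvSearch_min (H W h oh : Int) (hW : 2 ≤ W) :
    ∀ w, 1 ≤ w → w ≤ W - 1 →
    pvDiffB H W h oh (pvSearch H W h oh 1 (W - 1)) ≤ pvDiffB H W h oh w := by
  obtain ⟨h1, h2, h3, h4⟩ :=
    pvSearch_spec H W h oh 1 (W - 1) (W - 1 - 1).toNat 1 (W - 1) rfl (by omega)
      (Or.inl rfl) (Or.inl rfl)
  set m := pvSearch H W h oh 1 (W - 1) with hm
  intro w hw1 hw2
  rcases le_or_gt m w with hmw | hmw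
  · rcases h4 with h4 | h4
    · have : w = m := by omega
      rw [this]
    · exact pvDiffB_inc H W h oh m h4 w hmw
  · rcases h3 with h3 | h3
    · omega
    · have := pvDiffB_dec H W h oh (m - 1) (by simpa using h3) w (by omega)
      simpa using this

-- A's fold computes min(INF, min of diff over the range)
theorem sol_D_eq_fold_min (H W : Int) :
    sol_D H W = ((PySem.List.pyRange 1 W).map
      (pvDiffB H W (PySem.Int.floordiv H 2) (H - PySem.Int.floordiv H 2))).foldl min pvINF := by
  rw [sol_D, List.foldl_map]
  rfl

-- ===== VERDICT (by name: the statement is the Claim_ definition above) =====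
theorem sol_D_spec : Claim_equal_sol_D := by
  unfold Claim_equal_sol_D Spec_sol_D
  intro H W _
  by_cases hW : W < 2
  · rw [sol_D_eq_fold_min, sol_D_alt, if_pos hW, PySem.List.pyRange_one_eq_nil (by omega)]
    rfl
  · push Not at hW
    set h := PySem.Int.floordiv H 2 with hh
    set oh := H - h with hoh
    set m := pvSearch H W h oh 1 (W - 1) with hm
    have hmem : m ∈ PySem.List.pyRange 1 W := by
      obtain ⟨h1, h2, _, _⟩ :=
        pvSearch_spec H W h oh 1 (W - 1) (W - 1 - 1).toNat 1 (W - 1) rfl (by omega)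
          (Or.inl rfl) (Or.inl rfl)
      rw [PySem.List.mem_pyRange_one]
      omega
    have hminval := pvSearch_min H W h oh hW
    rw [sol_D_eq_fold_min, sol_D_alt, if_neg (by omega)]
    set l := (PySem.List.pyRange 1 W).map (pvDiffB H W h oh) with hl
    have hle := PySem.List.foldl_min_le l pvINF
    have hmem' : pvDiffB H W h oh m ∈ l := List.mem_map_of_mem hmem
    apply le_antisymm
    · exact le_min (hle.2 _ hmem') hle.1
    · rcases PySem.List.foldl_min_mem l pvINF with he | he
      · rw [he]; exact min_le_right _ _
      · obtain ⟨w, hwmem, hwe⟩ := List.mem_map.mp he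
        rw [PySem.List.mem_pyRange_one] at hwmem
        have := hminval w hwmem.1 (by omega)
        rw [← hwe]
        exact le_trans (min_le_left _ _) this
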